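-- pv_equiv track=rewrite | github.com/emcvey100/Portfolio | Yellow book/Level 2/1.12.py | LetterChanges
-- ===== SOURCE A (Python) =====
-- def LetterChanges(string):
--   word=[]
--   for i in string:
--     letter=i
--     num=ord(letter)
--     word.append(num)
--   for i in range (0, len(word)):
--     word[i]=int(word[i])+1
--     if word[i]==123:
--       word[i]=97
--     word[i]=chr(word[i])
--   new=""
--   for i in range (0, len(word)):
--     if word[i]=="i" or word[i]=="e" or word[i]=="a" or word[i]=="o" or word[i]=="u":
--       word[i]=word[i].capitalize()
--     new=new+word[i]
--   return new
-- ===== SOURCE B (Python) =====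
-- def LetterChanges(string):
--     table = {}
--     for c in set(string):
--         o = ord(c) + 1
--         repl = chr(97) if o == 123 else chr(o)
--         if repl in "aeiou":
--             repl = repl.upper()
--         table[ord(c)] = repl
--     return string.translate(table)
-- ===== Notes on version B (the rewrite author's own statement) =====
-- stated objective: idiomatic
-- what changed: B precomputes one shift-and-capitalize translation table per distinct character and applies it with str.translate in a single C-level pass, replacing A's three element-wise Python loops over parallel lists.
import Mathlib
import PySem

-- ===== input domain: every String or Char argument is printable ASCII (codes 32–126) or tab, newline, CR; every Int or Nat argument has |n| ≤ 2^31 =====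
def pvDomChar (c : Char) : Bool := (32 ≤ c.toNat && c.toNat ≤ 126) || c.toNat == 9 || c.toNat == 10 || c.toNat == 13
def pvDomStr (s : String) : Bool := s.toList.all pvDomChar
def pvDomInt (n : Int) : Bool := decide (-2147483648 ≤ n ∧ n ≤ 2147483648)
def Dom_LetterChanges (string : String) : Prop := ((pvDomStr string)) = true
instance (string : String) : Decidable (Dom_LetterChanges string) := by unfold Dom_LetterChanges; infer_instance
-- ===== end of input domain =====

-- B builds one shift-and-capitalize translation table per distinct character and applies it in a single
-- pass (str.translate), instead of A's three element-wise loops over parallel lists.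

-- ===== PORT A =====
def LetterChanges (string : String) : String :=
  -- first loop: word.append(ord(i))
  let word : List Int := string.toList.foldl (fun acc i => acc ++ [(i.toNat : Int)]) []
  -- second loop: word[i] = chr(97 if word[i]+1 == 123 else word[i]+1), element by element over the indices
  let word2 : List Char := word.map (fun n =>
    let n2 := n + 1
    let n3 := if n2 = 123 then (97 : Int) else n2
    Char.ofNat n3.toNat)
  -- third loop: capitalize vowels (capitalize on a single char = toUpper), new = new + word[i]
  word2.foldl (fun new c =>
    let c2 := if c = 'i' ∨ c = 'e' ∨ c = 'a' ∨ c = 'o' ∨ c = 'u' then c.toUpper else c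
    new.push c2) ""

-- ===== PORT B =====
-- the body of Source B's table-building loop, per character
def pvBRepl (c : Char) : Char :=
  let o : Int := (c.toNat : Int) + 1
  let repl := if o = 123 then Char.ofNat 97 else Char.ofNat o.toNat
  if repl ∈ "aeiou".toList then repl.toUpper else repl

def LetterChanges_alt (string : String) : String :=
  let table : PySem.Dict Int Char :=
    (PySem.Set.ofList string.toList).foldl (fun d c => d.insert (c.toNat : Int) (pvBRepl c)) PySem.Dict.empty
  -- str.translate: each char is replaced by its table entry, kept unchanged if absent
  String.ofList (string.toList.map (fun c => table.getD (c.toNat : Int) c))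

-- ===== PRECONDITION & SPEC =====
def Spec_LetterChanges (string : String) (out : String) : Prop := out = LetterChanges_alt string
instance (string : String) (out : String) : Decidable (Spec_LetterChanges string out) := by unfold Spec_LetterChanges; infer_instance

-- ===== CLAIM (what is proved, stated in full; the proofs are below) =====
def Claim_equal_LetterChanges : Prop := ∀ (string : String), Dom_LetterChanges string → Spec_LetterChanges string (LetterChanges string)

-- ===== LEMMAS AND PROOFS =====

-- A's first loop is map ord
lemma pv_foldA (l : List Char) (acc : List Int) :
    l.foldl (fun acc i => acc ++ [(i.toNat : Int)]) acc = acc ++ l.map (fun c => (c.toNat : Int)) := by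
  induction l generalizing acc with
  | nil => simp
  | cons c t ih => simp [List.foldl, ih]

-- A's third loop pushes h of each char
lemma pv_foldPush (h : Char → Char) (l : List Char) (s : String) :
    (l.foldl (fun new c => new.push (h c)) s).toList = s.toList ++ l.map h := by
  induction l generalizing s with
  | nil => simp
  | cons c t ih => simp [List.foldl, ih]

-- looking up a char's code in B's table yields its replacement
lemma pv_table_getD (l : List Char) (d : PySem.Dict Int Char) (x : Char) :
    (l.foldl (fun d c => d.insert (c.toNat : Int) (pvBRepl c)) d).getD (x.toNat : Int) x
      = if x ∈ l then pvBRepl x else d.getD (x.toNat : Int) x := by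
  induction l generalizing d with
  | nil => simp
  | cons c t ih =>
    simp only [List.foldl_cons, ih, List.mem_cons]
    by_cases hx : x ∈ t
    · simp [hx]
    · simp only [hx, or_false]
      by_cases he : x = c
      · subst he
        simp [PySem.Dict.getD_insert_self]
      · have hne : ((x.toNat : Int)) ≠ ((c.toNat : Int)) := by
          intro h
          apply he
          apply Char.ext
          exact UInt32.toNat_inj.mp (Int.ofNat.inj h)
        simp [he, PySem.Dict.getD_insert_of_ne d _ _ hne]

-- A's per-char pipeline equals Source B's per-char replacement
lemma pv_char_eq (c : Char) :
    (let c2 := Char.ofNat (if (c.toNat : Int) + 1 = 123 then (97 : Int) else (c.toNat : Int) + 1).toNat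
     if c2 = 'i' ∨ c2 = 'e' ∨ c2 = 'a' ∨ c2 = 'o' ∨ c2 = 'u' then c2.toUpper else c2) = pvBRepl c := by
  simp only [pvBRepl]
  by_cases h : (c.toNat : Int) + 1 = 123
  · simp [h]
  · simp only [if_neg h]
    have hm : ("aeiou".toList) = ['a', 'e', 'i', 'o', 'u'] := by decide
    set a := Char.ofNat ((c.toNat : Int) + 1).toNat with ha
    rw [hm]
    simp only [List.mem_cons, List.not_mem_nil, or_false]
    exact if_congr (by tauto) rfl rfl

-- ===== VERDICT (by name: the statement is the Claim_ definition above) =====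
theorem LetterChanges_spec : Claim_equal_LetterChanges := by
  intro s _
  show LetterChanges s = LetterChanges_alt s
  simp only [LetterChanges, LetterChanges_alt, pv_foldA, List.nil_append, List.map_map]
  have hlist := congrArg String.ofList (pv_foldPush (fun c =>
      if c = 'i' ∨ c = 'e' ∨ c = 'a' ∨ c = 'o' ∨ c = 'u' then c.toUpper else c)
      (List.map ((fun n =>
      let n2 := n + 1
      let n3 := if n2 = 123 then (97 : Int) else n2
      Char.ofNat n3.toNat) ∘ fun c => (c.toNat : Int)) s.toList) "")
  rw [String.ofList_toList] at hlist
  rw [hlist]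
  simp only [String.toList_empty, List.nil_append, List.map_map]
  congr 1
  apply List.map_congr_left
  intro c hc
  have hmem : c ∈ PySem.Set.ofList s.toList := (PySem.Set.mem_ofList _ _).mpr hc
  rw [pv_table_getD, if_pos hmem]
  exact pv_char_eq c
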